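-- pv_equiv track=rewrite | github.com/jkky-98/programmers | 백준/Gold/5557. 1학년/1학년.py | new_dp_maker
-- ===== SOURCE A (Python) =====
-- def new_dp_maker(dp, next_num):
--     new = [0] * 21
--     for idx, i in enumerate(dp):
--         if i > 0:
--             one = idx + next_num
--             two = idx - next_num
--             if 0 <= one <= 20:
--                 new[one] += i
--             if 0 <= two <= 20:
--                 new[two] += i
--
--     return new
-- ===== SOURCE B (Python) =====
-- def new_dp_maker(dp, next_num):
--     n = len(dp)
--
--     def pull(src):
--         return dp[src] if 0 <= src < n and dp[src] > 0 else 0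
--
--     return [pull(j - next_num) + pull(j + next_num) for j in range(21)]
-- ===== Notes on version B (the rewrite author's own statement) =====
-- stated objective: faster
-- what changed: Replaced the scatter loop over all of dp (pushing each positive count to its two target sums) by a gather over the 21 destination slots, pulling dp[j-next_num] and dp[j+next_num] into each slot, so the work no longer grows with len(dp) and the mutable accumulator array disappears.
import Mathlib
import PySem

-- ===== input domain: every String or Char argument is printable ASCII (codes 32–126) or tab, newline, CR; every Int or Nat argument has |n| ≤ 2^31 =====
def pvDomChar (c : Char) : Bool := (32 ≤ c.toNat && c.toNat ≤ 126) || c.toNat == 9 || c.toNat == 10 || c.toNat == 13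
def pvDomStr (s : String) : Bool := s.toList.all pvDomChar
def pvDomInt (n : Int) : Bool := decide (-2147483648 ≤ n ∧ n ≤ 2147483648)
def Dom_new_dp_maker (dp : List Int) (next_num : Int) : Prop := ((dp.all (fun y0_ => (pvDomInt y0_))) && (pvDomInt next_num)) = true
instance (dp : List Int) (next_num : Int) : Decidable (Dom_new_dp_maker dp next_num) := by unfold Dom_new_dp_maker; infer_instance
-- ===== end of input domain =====

-- B replaces A's scatter loop over dp by a gather over the 21 destination sums (alternative decomposition; return value only).

-- ===== PORT A =====
-- the `for idx, i in enumerate(dp)` loop, carried as structural recursion with an explicit index counter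
def pvLoopA (next_num : Int) : List Int → Nat → List Int → List Int
  | [], _, new => new
  | i :: rest, idx, new =>
    pvLoopA next_num rest (idx + 1)
      (if 0 < i then
        let one : Int := (idx : Int) + next_num
        let two : Int := (idx : Int) - next_num
        let new1 := if 0 ≤ one ∧ one ≤ 20 then new.set one.toNat (new.getD one.toNat 0 + i) else new
        if 0 ≤ two ∧ two ≤ 20 then new1.set two.toNat (new1.getD two.toNat 0 + i) else new1
      else new)

def new_dp_maker (dp : List Int) (next_num : Int) : List Int :=
  pvLoopA next_num dp 0 (List.replicate 21 0)

-- ===== PORT B =====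
-- pull(src) = dp[src] if 0 <= src < n and dp[src] > 0 else 0
def pvPull (dp : List Int) (src : Int) : Int :=
  if 0 ≤ src ∧ src < (dp.length : Int) ∧ 0 < dp.getD src.toNat 0 then dp.getD src.toNat 0 else 0

def new_dp_maker_alt (dp : List Int) (next_num : Int) : List Int :=
  (List.range 21).map (fun (j : Nat) => pvPull dp ((j : Int) - next_num) + pvPull dp ((j : Int) + next_num))

-- ===== PRECONDITION & SPEC =====
def Spec_new_dp_maker (dp : List Int) (next_num : Int) (out : List Int) : Prop := out = new_dp_maker_alt dp next_num
instance (dp : List Int) (next_num : Int) (out : List Int) : Decidable (Spec_new_dp_maker dp next_num out) := by unfold Spec_new_dp_maker; infer_instance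

-- ===== CLAIM (what is proved, stated in full; the proofs are below) =====
def Claim_equal_new_dp_maker : Prop := ∀ (dp : List Int) (next_num : Int), Dom_new_dp_maker dp next_num → Spec_new_dp_maker dp next_num (new_dp_maker dp next_num)

-- ===== LEMMAS AND PROOFS =====

-- 'pull' restricted to the suffix of dp that starts at absolute index k
def pvPullFrom (dp : List Int) (k : Nat) (src : Int) : Int :=
  if (k : Int) ≤ src ∧ src < (k : Int) + dp.length ∧ 0 < dp.getD (src - k).toNat 0
  then dp.getD (src - k).toNat 0 else 0

theorem pvPullFrom_zero (dp : List Int) (src : Int) : pvPullFrom dp 0 src = pvPull dp src := by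
  simp [pvPullFrom, pvPull]

theorem pvPullFrom_nil (k : Nat) (src : Int) : pvPullFrom [] k src = 0 := by
  simp [pvPullFrom]

theorem pvPullFrom_cons (i : Int) (rest : List Int) (k : Nat) (src : Int) :
    pvPullFrom (i :: rest) k src
      = (if src = (k : Int) ∧ 0 < i then i else 0) + pvPullFrom rest (k + 1) src := by
  unfold pvPullFrom
  by_cases h : src = (k : Int)
  · subst h
    simp
  · have hne : ¬ (src = (k : Int) ∧ 0 < i) := by tauto
    rw [if_neg hne, zero_add]
    by_cases hin : (k : Int) ≤ src ∧ src < (k : Int) + ((i :: rest).length : Int)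
    · have hk1 : ((k : Int) + 1) ≤ src := by omega
      have hget : (i :: rest).getD (src - k).toNat 0 = rest.getD (src - (k + 1)).toNat 0 := by
        have h1 : (src - k).toNat = (src - (k + 1)).toNat + 1 := by omega
        simp [h1]
      rw [hget]
      have hlen : src < ((k : Nat) + 1 : Int) + rest.length ↔ True := by
        simp at hin ⊢; omega
      split_ifs with h1 h2 h2 <;> simp_all <;> try omega
    · have h1 : ¬ ((k : Int) ≤ src ∧ src < (k : Int) + ((i :: rest).length : Int) ∧
          0 < (i :: rest).getD (src - k).toNat 0) := by tauto
      have h2 : ¬ (((k : Nat) + 1 : Int) ≤ src ∧ src < ((k : Nat) + 1 : Int) + (rest.length : Int) ∧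
          0 < rest.getD (src - (k + 1)).toNat 0) := by
        simp at hin ⊢; omega
      rw [if_neg h1]
      simp only [Nat.cast_add, Nat.cast_one] at h2 ⊢
      rw [if_neg h2]

theorem pvLoopA_length (next_num : Int) (dp : List Int) (k : Nat) (new : List Int) :
    (pvLoopA next_num dp k new).length = new.length := by
  induction dp generalizing k new with
  | nil => simp [pvLoopA]
  | cons i rest ih =>
    simp only [pvLoopA]
    rw [ih]
    split_ifs <;> simp

-- one scatter step, read at destination j
theorem pvStep_getD (next_num i : Int) (k : Nat) (new : List Int) (hlen : new.length = 21)
    (j : Nat) (hj : j < 21) :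
    (let one : Int := (k : Int) + next_num
     let two : Int := (k : Int) - next_num
     let new1 := if 0 ≤ one ∧ one ≤ 20 then new.set one.toNat (new.getD one.toNat 0 + i) else new
     if 0 ≤ two ∧ two ≤ 20 then new1.set two.toNat (new1.getD two.toNat 0 + i) else new1).getD j 0
    = new.getD j 0 + (if (j : Int) - next_num = (k : Int) then i else 0)
        + (if (j : Int) + next_num = (k : Int) then i else 0) := by
  simp only
  set one : Int := (k : Int) + next_num with hone
  set two : Int := (k : Int) - next_num with htwo
  have hgetset : ∀ (l : List Int) (t : Nat) (v : Int), l.length = 21 → t < 21 →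
      (l.set t v).getD j 0 = if t = j then v else l.getD j 0 := by
    intro l t v hl ht
    by_cases he : t = j
    · subst he; simp [List.getD, List.getElem?_set_self, hl.symm ▸ ht, ht, hl]
    · simp [List.getD, List.getElem?_set_ne he]
      intro h; omega
  by_cases h1 : 0 ≤ one ∧ one ≤ 20
  · have hlen1 : (new.set one.toNat (new.getD one.toNat 0 + i)).length = 21 := by simp [hlen]
    by_cases h2 : 0 ≤ two ∧ two ≤ 20
    · rw [if_pos h1, if_pos h2]
      by_cases e2 : two.toNat = j
      · rw [e2, hgetset _ _ _ hlen1 hj, if_pos rfl]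
        rw [hgetset _ _ _ hlen (by omega)]
        rw [if_pos (show (j : Int) + next_num = (k : Int) by omega)]
        by_cases e1 : one.toNat = j
        · rw [if_pos e1, if_pos (show (j : Int) - next_num = (k : Int) by omega)]; rw [e1]; try ring
        · rw [if_neg e1, if_neg (show ¬ ((j : Int) - next_num = (k : Int)) by omega)]; ring
      · rw [hgetset _ _ _ hlen1 (show two.toNat < 21 by omega), if_neg e2]
        rw [hgetset _ _ _ hlen (by omega)]
        rw [if_neg (show ¬ ((j : Int) + next_num = (k : Int)) by omega)]
        by_cases e1 : one.toNat = j
        · rw [if_pos e1, if_pos (show (j : Int) - next_num = (k : Int) by omega)]; rw [e1]; try ring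
        · rw [if_neg e1, if_neg (show ¬ ((j : Int) - next_num = (k : Int)) by omega)]; ring
    · rw [if_pos h1, if_neg h2]
      rw [hgetset _ _ _ hlen (by omega)]
      rw [if_neg (show ¬ ((j : Int) + next_num = (k : Int)) by omega)]
      by_cases e1 : one.toNat = j
      · rw [if_pos e1, if_pos (show (j : Int) - next_num = (k : Int) by omega)]; rw [e1]; try ring
      · rw [if_neg e1, if_neg (show ¬ ((j : Int) - next_num = (k : Int)) by omega)]; ring
  · rw [if_neg h1, if_neg (show ¬ ((j : Int) - next_num = (k : Int)) by omega)]
    by_cases h2 : 0 ≤ two ∧ two ≤ 20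
    · rw [if_pos h2]
      by_cases e2 : two.toNat = j
      · rw [e2, hgetset _ _ _ hlen hj, if_pos rfl]
        rw [if_pos (show (j : Int) + next_num = (k : Int) by omega)]; try ring
      · rw [hgetset _ _ _ hlen (show two.toNat < 21 by omega), if_neg e2]
        rw [if_neg (show ¬ ((j : Int) + next_num = (k : Int)) by omega)]; ring
    · rw [if_neg h2]
      rw [if_neg (show ¬ ((j : Int) + next_num = (k : Int)) by omega)]; ring

-- loop invariant: the fold, read at destination j, equals the accumulator plus the two pulls from the remaining suffix
theorem pvLoopA_getD (next_num : Int) (dp : List Int) (k : Nat) (new : List Int)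
    (hlen : new.length = 21) (j : Nat) (hj : j < 21) :
    (pvLoopA next_num dp k new).getD j 0
      = new.getD j 0 + pvPullFrom dp k ((j : Int) - next_num)
          + pvPullFrom dp k ((j : Int) + next_num) := by
  induction dp generalizing k new with
  | nil => simp [pvLoopA, pvPullFrom_nil]
  | cons i rest ih =>
    simp only [pvLoopA]
    rw [pvPullFrom_cons, pvPullFrom_cons]
    by_cases hi : 0 < i
    · rw [if_pos hi]
      have hlen' : (let one : Int := (k : Int) + next_num
          let two : Int := (k : Int) - next_num
          let new1 := if 0 ≤ one ∧ one ≤ 20 then new.set one.toNat (new.getD one.toNat 0 + i) else new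
          if 0 ≤ two ∧ two ≤ 20 then new1.set two.toNat (new1.getD two.toNat 0 + i) else new1).length = 21 := by
        simp only; split_ifs <;> simp [hlen]
      rw [ih _ _ hlen']
      rw [pvStep_getD next_num i k new hlen j hj]
      have e1 : (if (j : Int) - next_num = (k : Int) ∧ 0 < i then i else 0)
          = (if (j : Int) - next_num = (k : Int) then i else 0) := by
        split_ifs <;> tauto
      have e2 : (if (j : Int) + next_num = (k : Int) ∧ 0 < i then i else 0)
          = (if (j : Int) + next_num = (k : Int) then i else 0) := by
        split_ifs <;> tauto
      rw [e1, e2]; ring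
    · rw [if_neg hi, ih _ _ hlen]
      have e1 : (if (j : Int) - next_num = (k : Int) ∧ 0 < i then i else 0) = 0 := by
        split_ifs <;> tauto
      have e2 : (if (j : Int) + next_num = (k : Int) ∧ 0 < i then i else 0) = 0 := by
        split_ifs <;> tauto
      rw [e1, e2]; ring

-- ===== VERDICT (by name: the statement is the Claim_ definition above) =====
theorem new_dp_maker_spec : Claim_equal_new_dp_maker := by
  intro dp next_num _
  unfold Spec_new_dp_maker
  have hlenA : (new_dp_maker dp next_num).length = 21 := by
    unfold new_dp_maker; rw [pvLoopA_length]; simp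
  have hlenB : (new_dp_maker_alt dp next_num).length = 21 := by
    unfold new_dp_maker_alt; simp
  apply List.ext_getElem (by rw [hlenA, hlenB])
  intro j hja hjb
  have hj : j < 21 := by rwa [hlenA] at hja
  have hB : (new_dp_maker_alt dp next_num)[j]'hjb
      = pvPull dp ((j : Int) - next_num) + pvPull dp ((j : Int) + next_num) := by
    unfold new_dp_maker_alt
    simp only [List.getElem_map, List.getElem_range]
  rw [hB, ← List.getD_eq_getElem _ 0 hja]
  unfold new_dp_maker
  rw [pvLoopA_getD next_num dp 0 (List.replicate 21 0) (by simp) j hj]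
  rw [List.getD_replicate, pvPullFrom_zero, pvPullFrom_zero, zero_add]
  exact hj
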